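-- pv_equiv track=rewrite | github.com/rajkar86/python_coding_interviews | basics/variations/backtracking.py | listCombinationsReturn
-- ===== SOURCE A (Python) =====
-- from functools import lru_cache
--
-- def listCombinationsReturn(amount, coins):
--
--   @lru_cache(maxsize=None)  # or @cache
--   def helper(a, start):
--
--     if a < 0: return []
--     if a == 0: return [[]]
--
--     ret = []
--     for i in range(start, len(coins)):
--       c = coins[i]
--       ret += [[c] + l for l in helper(a-c, i)]
--       # won't treat different orderings as unique because if we add a later number then we can only add that number or ones after (canonical ordering)
--       # change i -> i+1 if there's no reuse
--
--     return ret
--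
--   return  helper(amount, 0)
-- ===== SOURCE B (Python) =====
-- from functools import lru_cache
--
-- def listCombinationsReturn(amount, coins):
--     n = len(coins)
--
--     @lru_cache(maxsize=None)
--     def feasible(a, start):
--         if a < 0:
--             return False
--         if a == 0:
--             return True
--         for i in range(start, n):
--             if feasible(a - coins[i], i):
--                 return True
--         return False
--
--     result = []
--     path = []
--
--     def bt(a, start):
--         if a == 0:
--             result.append(path[:])
--             return
--         for i in range(start, n):
--             if feasible(a - coins[i], i):
--                 path.append(coins[i])
--                 bt(a - coins[i], i)
--                 path.pop()
--
--     if feasible(amount, 0):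
--         bt(amount, 0)
--     return result
-- ===== Notes on version B (the rewrite author's own statement) =====
-- stated objective: alternative
-- what changed: Instead of A's memoized recursion that builds and concatenates prefixed copies of sub-result lists, B first computes a memoized boolean feasibility test and then backtracks with a shared mutable path and a single result accumulator, descending only into branches the test marks feasible and copying the path once per solution.
import Mathlib
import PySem

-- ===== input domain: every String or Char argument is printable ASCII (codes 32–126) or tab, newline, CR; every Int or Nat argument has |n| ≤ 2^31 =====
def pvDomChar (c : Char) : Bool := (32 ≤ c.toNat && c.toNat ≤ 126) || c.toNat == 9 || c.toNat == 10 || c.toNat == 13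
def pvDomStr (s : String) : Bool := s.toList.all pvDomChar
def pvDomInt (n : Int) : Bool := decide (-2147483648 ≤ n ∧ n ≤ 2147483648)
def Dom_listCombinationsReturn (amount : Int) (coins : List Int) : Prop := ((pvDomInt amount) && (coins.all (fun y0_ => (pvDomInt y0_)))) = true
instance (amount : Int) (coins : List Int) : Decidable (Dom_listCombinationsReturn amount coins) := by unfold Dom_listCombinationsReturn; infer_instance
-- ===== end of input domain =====

-- B replaces A's memoized build-and-concatenate recursion by a two-phase search: a boolean
-- feasibility test plus backtracking over a shared path and one result accumulator; the
-- return values are identical on Pre_.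

-- Small termination lemmas cited by the ports' decreasing_by (kept as named lemmas on purpose).
theorem pvDecAmount {a c : Int} (h : ¬a < 0) (h0 : ¬a = 0) (hc : 0 < c) :
    (a - c).toNat < a.toNat :=
  (Int.toNat_lt_toNat (lt_of_le_of_ne (not_lt.mp h) (Ne.symm h0))).mpr (sub_lt_self a hc)

-- ===== PORT A =====
-- helper(a, start) of A; the loop over i ∈ range(start, len(coins)) is the structural
-- recursion on start. The '0 < c' test is purely a totality guard: when some coin is ≤ 0
-- and a > 0 the Python recursion never terminates (RecursionError), which Pre_ excludes.
def pvHelperA (coins : List Int) (a : Int) (start : Nat) : List (List Int) :=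
  if a < 0 then []
  else if a = 0 then [[]]
  else if h : start < coins.length then
    let c := coins[start]
    (if hc : 0 < c then (pvHelperA coins (a - c) start).map (fun l => c :: l) else [])
      ++ pvHelperA coins a (start + 1)
  else []
termination_by (a.toNat, coins.length - start)
decreasing_by
  · exact Prod.Lex.left _ _ (pvDecAmount (by assumption) (by assumption) hc)
  · exact Prod.Lex.right _ (Nat.sub_succ_lt_self _ _ h)

def listCombinationsReturn (amount : Int) (coins : List Int) : List (List Int) :=
  pvHelperA coins amount 0

-- ===== PORT B =====
-- feasible(a, start) of B: the memoized boolean test; the for-loop with early 'return True'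
-- is the ||-recursion on start. Same '0 < c' totality guard as in A's port.
def pvFeasible (coins : List Int) (a : Int) (start : Nat) : Bool :=
  if a < 0 then false
  else if a = 0 then true
  else if h : start < coins.length then
    let c := coins[start]
    (if hc : 0 < c then pvFeasible coins (a - c) start else false)
      || pvFeasible coins a (start + 1)
  else false
termination_by (a.toNat, coins.length - start)
decreasing_by
  · exact Prod.Lex.left _ _ (pvDecAmount (by assumption) (by assumption) hc)
  · exact Prod.Lex.right _ (Nat.sub_succ_lt_self _ _ h)

-- a feasible state has a nonnegative remaining amount (cited by pvBtB's decreasing_by)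
theorem pvFeasible_nonneg (coins : List Int) (a : Int) (start : Nat)
    (h : pvFeasible coins a start = true) : 0 ≤ a := by
  by_contra hneg
  rw [pvFeasible] at h
  simp [not_le.mp hneg] at h

theorem pvDecAmountFeas {coins : List Int} {a c : Int} {s : Nat} (hc : 0 < c)
    (hf : pvFeasible coins (a - c) s = true) : (a - c).toNat < a.toNat :=
  (Int.toNat_lt_toNat (lt_of_lt_of_le hc (sub_nonneg.mp (pvFeasible_nonneg _ _ _ hf)))).mpr
    (sub_lt_self a hc)

-- bt(a, start) of B: threads the accumulator `res` (Python's shared `result`) and the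
-- current `path`; at a leaf it appends a copy of path; it descends only into branches
-- the feasibility test accepts.
def pvBtB (coins : List Int) (a : Int) (start : Nat) (path : List Int)
    (res : List (List Int)) : List (List Int) :=
  if a = 0 then res ++ [path]
  else if h : start < coins.length then
    let c := coins[start]
    pvBtB coins a (start + 1) path
      (if hc : 0 < c then
        (if hf : pvFeasible coins (a - c) start = true then
          pvBtB coins (a - c) start (path ++ [c]) res
        else res)
      else res)
  else res
termination_by (a.toNat, coins.length - start)
decreasing_by
  · exact Prod.Lex.left _ _ (pvDecAmountFeas hc hf)
  · exact Prod.Lex.right _ (Nat.sub_succ_lt_self _ _ h)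

def listCombinationsReturn_alt (amount : Int) (coins : List Int) : List (List Int) :=
  if pvFeasible coins amount 0 then pvBtB coins amount 0 [] [] else []

-- ===== PRECONDITION & SPEC =====
-- Pre_ excludes exactly the inputs where Python A hits unbounded recursion (RecursionError):
-- amount > 0 together with some coin ≤ 0; Python B raises RecursionError there as well.
def Pre_listCombinationsReturn (amount : Int) (coins : List Int) : Prop :=
  amount ≤ 0 ∨ ∀ c ∈ coins, 0 < c
instance (amount : Int) (coins : List Int) : Decidable (Pre_listCombinationsReturn amount coins) := by
  unfold Pre_listCombinationsReturn; infer_instance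

def pvWitness_listCombinationsReturn : Int × List Int := (7, [1, 2, 5])

def Spec_listCombinationsReturn (amount : Int) (coins : List Int) (out : List (List Int)) : Prop := out = listCombinationsReturn_alt amount coins
instance (amount : Int) (coins : List Int) (out : List (List Int)) : Decidable (Spec_listCombinationsReturn amount coins out) := by unfold Spec_listCombinationsReturn; infer_instance

-- ===== CLAIM (what is proved, stated in full; the proofs are below) =====
def Claim_equal_listCombinationsReturn : Prop := ∀ (amount : Int) (coins : List Int), Dom_listCombinationsReturn amount coins → Pre_listCombinationsReturn amount coins → Spec_listCombinationsReturn amount coins (listCombinationsReturn amount coins)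

-- ===== LEMMAS AND PROOFS =====

-- The feasibility test says exactly whether A's sub-result is nonempty.
theorem pvFeasible_eq (coins : List Int) (a : Int) (start : Nat) :
    pvFeasible coins a start = !(pvHelperA coins a start).isEmpty := by
  fun_induction pvFeasible coins a start with
  | case1 a start h =>
      rw [pvHelperA]; simp [h]
  | case2 start h =>
      rw [pvHelperA]; simp
  | case3 a start h h0 hlt c ih1 ih2 =>
      rw [pvHelperA]
      by_cases hc : (0 : Int) < c
      all_goals have hc' : ((0 : Int) < coins[start]) = ((0 : Int) < c) := rfl
      · simp only [hc, if_true, dite_eq_ite] at ih2 ⊢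
        have hcc : pvHelperA coins (a - coins[start]) start = pvHelperA coins (a - c) start := rfl
        simp [h, h0, hlt, hc', hc, ih1 hc, ih2, hcc]
        cases pvHelperA coins (a - c) start <;> simp
      · simp only [hc, if_false, dite_eq_ite] at ih2 ⊢
        simp [h, h0, hlt, hc', hc, ih2]
  | case4 a start h h0 hlt =>
      rw [pvHelperA]; simp [h, h0, hlt]

-- An infeasible state has an empty sub-result on A's side.
theorem pvHelperA_empty (coins : List Int) (a : Int) (start : Nat)
    (h : pvFeasible coins a start = false) : pvHelperA coins a start = [] := by
  have he := pvFeasible_eq coins a start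
  rw [h] at he
  exact List.isEmpty_iff.mp (by simpa using he.symm)

-- helper vanishes on negative amounts.
theorem pvHelperA_a_neg (coins : List Int) (a : Int) (start : Nat) (ha : a < 0) :
    pvHelperA coins a start = [] := by
  rw [pvHelperA]; simp [ha]

-- The accumulator run of B computes A's sub-result, each element prefixed by `path`,
-- appended after `res` (states pruned by the feasibility test contribute nothing).
theorem pvBtB_eq (coins : List Int) (a : Int) (start : Nat) (path : List Int)
    (res : List (List Int)) :
    pvBtB coins a start path res
      = res ++ (pvHelperA coins a start).map (fun l => path ++ l) := by
  fun_induction pvBtB coins a start path res with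
  | case1 start path res =>
      rw [pvHelperA]; simp
  | case2 a start path res h0 hlt c ih1' ih1 ih2 =>
      rw [pvHelperA]
      by_cases hc : (0 : Int) < c
      all_goals have hc' : ((0 : Int) < coins[start]) = ((0 : Int) < c) := rfl
      · by_cases hf : pvFeasible coins (a - c) start = true
        · simp only [hc, hf, if_true, dite_eq_ite] at ih2 ⊢
          rw [ih2, ih1 hc hf]
          by_cases ha : a < 0
          · -- a < 0 is impossible here: a - c < a < 0 would be infeasible, yet hf holds
            exact absurd (pvFeasible_nonneg _ _ _ hf)
              (not_le.mpr (by linarith [sub_lt_self a hc]))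
          · simp [ha, h0, hlt, hc', hc, List.map_map, Function.comp_def]
        · have hbr : pvHelperA coins (a - c) start = [] :=
            pvHelperA_empty _ _ _ (Bool.not_eq_true _ ▸ eq_false_of_ne_true hf)
          simp only [hc, hf, if_true, dite_eq_ite] at ih2 ⊢
          rw [ih2]
          by_cases ha : a < 0
          · rw [if_pos ha]; simp [pvHelperA_a_neg coins a (start + 1) ha]
          · simp [ha, h0, hlt, hc', hc]
            exact hbr
      · simp only [hc, if_false, dite_eq_ite] at ih2 ⊢
        rw [ih2]
        by_cases ha : a < 0
        · rw [if_pos ha]; simp [pvHelperA_a_neg coins a (start + 1) ha]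
        · simp [ha, h0, hlt, hc', hc]
  | case3 a start path res h0 hlt =>
      rw [pvHelperA]
      by_cases ha : a < 0
      · simp [ha]
      · simp [ha, h0, hlt]

-- ===== VERDICT (by name: the statement is the Claim_ definition above) =====
theorem listCombinationsReturn_spec : Claim_equal_listCombinationsReturn := by
  intro amount coins _ _
  unfold Spec_listCombinationsReturn listCombinationsReturn listCombinationsReturn_alt
  by_cases hf : pvFeasible coins amount 0 = true
  · rw [if_pos hf, pvBtB_eq]
    simp
  · rw [if_neg hf, pvHelperA_empty _ _ _ (eq_false_of_ne_true hf)]
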